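-- pv_equiv track=rewrite | github.com/RelativelyBigMan/chessbot | main.py | check_valid_bishop
-- ===== SOURCE A (Python) =====
-- def check_valid_bishop(x1,y1,x2,y2):
--     possibleMoves = []
--     for iii in range(8):
--         if (0 <= x1+iii <= 7 and 0 <= y1+iii <= 7):
--             possibleMoves.append((x1+iii,y1+iii))
--         if (0 <= x1-iii <= 7 and 0 <= y1-iii <= 7):
--             possibleMoves.append((x1-iii,y1-iii))
--         if (0 <= x1-iii <= 7 and 0 <= y1+iii <= 7):
--             possibleMoves.append((x1-iii,y1+iii))
--         if (0 <= x1+iii <= 7 and 0 <= y1-iii <= 7):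
--             possibleMoves.append((x1+iii,y1-iii))
--
--     if (x2,y2) in possibleMoves:
--         return True
--     return False
-- ===== SOURCE B (Python) =====
-- def check_valid_bishop(x1, y1, x2, y2):
--     dx = abs(x2 - x1)
--     dy = abs(y2 - y1)
--     return dx == dy and dx <= 7 and 0 <= x2 <= 7 and 0 <= y2 <= 7
-- ===== Notes on version B (the rewrite author's own statement) =====
-- stated objective: simpler
-- what changed: Replaced the 8-step enumeration of diagonal candidate squares into a list plus a membership test by a direct arithmetic predicate: |x2-x1| == |y2-y1| <= 7 and the destination square is on the board.
import Mathlib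
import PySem

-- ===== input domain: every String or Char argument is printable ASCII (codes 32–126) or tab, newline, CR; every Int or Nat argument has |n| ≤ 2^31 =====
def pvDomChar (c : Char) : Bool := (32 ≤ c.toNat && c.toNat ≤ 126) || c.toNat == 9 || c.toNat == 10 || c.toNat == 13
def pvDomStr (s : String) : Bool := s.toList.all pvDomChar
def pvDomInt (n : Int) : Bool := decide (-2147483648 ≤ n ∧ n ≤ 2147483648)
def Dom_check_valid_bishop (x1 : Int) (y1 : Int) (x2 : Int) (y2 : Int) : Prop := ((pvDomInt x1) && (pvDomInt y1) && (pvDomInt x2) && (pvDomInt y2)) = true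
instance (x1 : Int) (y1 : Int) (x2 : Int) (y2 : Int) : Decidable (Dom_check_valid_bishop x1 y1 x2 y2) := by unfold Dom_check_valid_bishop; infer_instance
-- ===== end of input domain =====

-- B replaces A's enumeration of candidate diagonal squares into a list plus a
-- membership test by a direct arithmetic predicate (simpler; no loop, no list).

-- ===== PORT A =====
-- one iteration of A's for-loop body: the four conditional appends
def checkValidBishopStep (x1 : Int) (y1 : Int) (acc : List (Int × Int)) (iii : Int) :
    List (Int × Int) :=
  let acc := if 0 ≤ x1 + iii ∧ x1 + iii ≤ 7 ∧ 0 ≤ y1 + iii ∧ y1 + iii ≤ 7 then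
    acc ++ [(x1 + iii, y1 + iii)] else acc
  let acc := if 0 ≤ x1 - iii ∧ x1 - iii ≤ 7 ∧ 0 ≤ y1 - iii ∧ y1 - iii ≤ 7 then
    acc ++ [(x1 - iii, y1 - iii)] else acc
  let acc := if 0 ≤ x1 - iii ∧ x1 - iii ≤ 7 ∧ 0 ≤ y1 + iii ∧ y1 + iii ≤ 7 then
    acc ++ [(x1 - iii, y1 + iii)] else acc
  let acc := if 0 ≤ x1 + iii ∧ x1 + iii ≤ 7 ∧ 0 ≤ y1 - iii ∧ y1 - iii ≤ 7 then
    acc ++ [(x1 + iii, y1 - iii)] else acc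
  acc

def check_valid_bishop (x1 : Int) (y1 : Int) (x2 : Int) (y2 : Int) : Bool :=
  let possibleMoves := (PySem.List.pyRange 0 8 1).foldl (checkValidBishopStep x1 y1) []
  if (x2, y2) ∈ possibleMoves then true else false

-- ===== PORT B =====
def check_valid_bishop_alt (x1 : Int) (y1 : Int) (x2 : Int) (y2 : Int) : Bool :=
  let dx := |x2 - x1|
  let dy := |y2 - y1|
  decide (dx = dy ∧ dx ≤ 7 ∧ 0 ≤ x2 ∧ x2 ≤ 7 ∧ 0 ≤ y2 ∧ y2 ≤ 7)

-- ===== PRECONDITION & SPEC =====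
def Spec_check_valid_bishop (x1 : Int) (y1 : Int) (x2 : Int) (y2 : Int) (out : Bool) : Prop := out = check_valid_bishop_alt x1 y1 x2 y2
instance (x1 : Int) (y1 : Int) (x2 : Int) (y2 : Int) (out : Bool) : Decidable (Spec_check_valid_bishop x1 y1 x2 y2 out) := by unfold Spec_check_valid_bishop; infer_instance

-- ===== CLAIM (what is proved, stated in full; the proofs are below) =====
def Claim_equal_check_valid_bishop : Prop := ∀ (x1 : Int) (y1 : Int) (x2 : Int) (y2 : Int), Dom_check_valid_bishop x1 y1 x2 y2 → Spec_check_valid_bishop x1 y1 x2 y2 (check_valid_bishop x1 y1 x2 y2)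

-- ===== LEMMAS AND PROOFS =====

-- the square (x2,y2) that one loop iteration may add, as a proposition
def bishopHit (x1 y1 iii x2 y2 : Int) : Prop :=
  (x2 = x1 + iii ∧ y2 = y1 + iii ∧ 0 ≤ x2 ∧ x2 ≤ 7 ∧ 0 ≤ y2 ∧ y2 ≤ 7) ∨
  (x2 = x1 - iii ∧ y2 = y1 - iii ∧ 0 ≤ x2 ∧ x2 ≤ 7 ∧ 0 ≤ y2 ∧ y2 ≤ 7) ∨
  (x2 = x1 - iii ∧ y2 = y1 + iii ∧ 0 ≤ x2 ∧ x2 ≤ 7 ∧ 0 ≤ y2 ∧ y2 ≤ 7) ∨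
  (x2 = x1 + iii ∧ y2 = y1 - iii ∧ 0 ≤ x2 ∧ x2 ≤ 7 ∧ 0 ≤ y2 ∧ y2 ≤ 7)

lemma mem_ite_append {α : Type} {p a : α} {l : List α} {c : Prop} [Decidable c] :
    p ∈ (if c then l ++ [a] else l) ↔ p ∈ l ∨ (c ∧ p = a) := by
  split_ifs with hc <;> simp [hc]

lemma mem_step (x1 y1 iii x2 y2 : Int) (acc : List (Int × Int)) :
    (x2, y2) ∈ checkValidBishopStep x1 y1 acc iii ↔
      (x2, y2) ∈ acc ∨ bishopHit x1 y1 iii x2 y2 := by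
  simp only [checkValidBishopStep, mem_ite_append, Prod.mk.injEq, bishopHit]
  constructor
  · rintro ((((h | h) | h) | h) | h)
    · exact Or.inl h
    · exact Or.inr (Or.inl (by omega))
    · exact Or.inr (Or.inr (Or.inl (by omega)))
    · exact Or.inr (Or.inr (Or.inr (Or.inl (by omega))))
    · exact Or.inr (Or.inr (Or.inr (Or.inr (by omega))))
  · rintro (h | h | h | h | h)
    · exact Or.inl (Or.inl (Or.inl (Or.inl h)))
    · exact Or.inl (Or.inl (Or.inl (Or.inr (by omega))))
    · exact Or.inl (Or.inl (Or.inr (by omega)))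
    · exact Or.inl (Or.inr (by omega))
    · exact Or.inr (by omega)

lemma mem_foldl (x1 y1 x2 y2 : Int) (l : List Int) (acc : List (Int × Int)) :
    (x2, y2) ∈ l.foldl (checkValidBishopStep x1 y1) acc ↔
      (x2, y2) ∈ acc ∨ ∃ iii ∈ l, bishopHit x1 y1 iii x2 y2 := by
  induction l generalizing acc with
  | nil => simp
  | cons a t ih =>
    simp only [List.foldl_cons, ih, mem_step, List.mem_cons]
    constructor
    · rintro ((h | h) | ⟨i, hi, hh⟩)
      · exact Or.inl h
      · exact Or.inr ⟨a, Or.inl rfl, h⟩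
      · exact Or.inr ⟨i, Or.inr hi, hh⟩
    · rintro (h | ⟨i, (rfl | hi), hh⟩)
      · exact Or.inl (Or.inl h)
      · exact Or.inl (Or.inr hh)
      · exact Or.inr ⟨i, hi, hh⟩

-- ===== VERDICT (by name: the statement is the Claim_ definition above) =====
theorem check_valid_bishop_spec : Claim_equal_check_valid_bishop := by
  unfold Claim_equal_check_valid_bishop
  intro x1 y1 x2 y2 _
  unfold Spec_check_valid_bishop check_valid_bishop check_valid_bishop_alt
  have hr : PySem.List.pyRange 0 8 1 = [0, 1, 2, 3, 4, 5, 6, 7] := by decide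
  rw [hr]
  have hmem := mem_foldl x1 y1 x2 y2 [0, 1, 2, 3, 4, 5, 6, 7] []
  simp only [List.not_mem_nil, false_or] at hmem
  by_cases hb : |x2 - x1| = |y2 - y1| ∧ |x2 - x1| ≤ 7 ∧ 0 ≤ x2 ∧ x2 ≤ 7 ∧ 0 ≤ y2 ∧ y2 ≤ 7
  · have hin : (x2, y2) ∈ List.foldl (checkValidBishopStep x1 y1) [] [0, 1, 2, 3, 4, 5, 6, 7] := by
      refine hmem.mpr ⟨|x2 - x1|, ?_, ?_⟩
      · simp only [List.mem_cons, List.not_mem_nil, or_false]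
        rcases abs_cases (x2 - x1) with ⟨h1, _⟩ | ⟨h1, _⟩ <;> omega
      · unfold bishopHit
        rcases abs_cases (x2 - x1) with ⟨h1, _⟩ | ⟨h1, _⟩ <;>
          rcases abs_cases (y2 - y1) with ⟨h2, _⟩ | ⟨h2, _⟩ <;> omega
    rw [if_pos hin]
    exact (decide_eq_true hb).symm
  · have hout : (x2, y2) ∉ List.foldl (checkValidBishopStep x1 y1) [] [0, 1, 2, 3, 4, 5, 6, 7] := by
      intro hc
      obtain ⟨i, hi, hhit⟩ := hmem.mp hc
      apply hb
      simp only [List.mem_cons, List.not_mem_nil, or_false] at hi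
      unfold bishopHit at hhit
      rcases abs_cases (x2 - x1) with ⟨h1, _⟩ | ⟨h1, _⟩ <;>
        rcases abs_cases (y2 - y1) with ⟨h2, _⟩ | ⟨h2, _⟩ <;>
        rcases hi with rfl | rfl | rfl | rfl | rfl | rfl | rfl | rfl <;> omega
    rw [if_neg hout]
    exact (decide_eq_false hb).symm
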